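-- pv_equiv track=rewrite | github.com/xiaolini/CC-detection | GetStatisticFeature.py | get_portKindNumber
-- ===== SOURCE A (Python) =====
-- def get_portKindNumber(sport,dport):#统计每一个pcap包的端口号数目
--     kinds=[]
--     for p in sport:
--         if p in kinds:
--             continue
--         kinds.append(p)
--     for p in dport:
--         if p in kinds:
--             continue
--         kinds.append(p)
--     return len(kinds)
-- ===== SOURCE B (Python) =====
-- def get_portKindNumber(sport, dport):
--     xs = sorted(sport + dport)
--     if not xs:
--         return 0
--     count = 1
--     prev = xs[0]
--     for x in xs[1:]:
--         if x != prev: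
--             count += 1
--         prev = x
--     return count
-- ===== Notes on version B (the rewrite author's own statement) =====
-- stated objective: faster
-- what changed: Replaces the quadratic grow-and-membership-check dedup loops with sort the combined list once and count positions where an element differs from its predecessor.
import Mathlib
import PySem

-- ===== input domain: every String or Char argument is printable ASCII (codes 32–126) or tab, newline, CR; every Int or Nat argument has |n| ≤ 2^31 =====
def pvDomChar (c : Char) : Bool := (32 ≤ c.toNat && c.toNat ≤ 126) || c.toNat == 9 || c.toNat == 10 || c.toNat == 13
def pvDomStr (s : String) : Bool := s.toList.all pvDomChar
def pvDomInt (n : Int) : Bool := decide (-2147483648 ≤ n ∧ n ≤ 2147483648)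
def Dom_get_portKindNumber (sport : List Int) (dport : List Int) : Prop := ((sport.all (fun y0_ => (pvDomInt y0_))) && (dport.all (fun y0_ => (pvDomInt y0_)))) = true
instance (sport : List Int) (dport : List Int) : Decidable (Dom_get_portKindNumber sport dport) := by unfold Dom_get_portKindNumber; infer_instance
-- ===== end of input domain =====

-- B replaces A's quadratic grow-and-membership-check dedup with sort-then-count-adjacent-changes (objective: faster).

-- ===== PORT A =====
-- one 'for p in ps: if p in kinds: continue; kinds.append(p)' loop of A
def pvKindsLoop (kinds : List Int) (ps : List Int) : List Int :=
  ps.foldl (fun ks p => if p ∈ ks then ks else ks ++ [p]) kinds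

def get_portKindNumber (sport : List Int) (dport : List Int) : Int :=
  let kinds := pvKindsLoop [] sport
  let kinds := pvKindsLoop kinds dport
  (kinds.length : Int)

-- ===== PORT B =====
-- the 'for x in xs[1:]' scan of Source B, carrying prev and count
def pvScan (prev : Int) (count : Int) : List Int → Int
  | [] => count
  | x :: rest => pvScan x (if x ≠ prev then count + 1 else count) rest

def get_portKindNumber_alt (sport : List Int) (dport : List Int) : Int :=
  match PySem.List.sorted (sport ++ dport) (fun x => x) false with
  | [] => 0
  | x :: rest => pvScan x 1 rest

-- ===== PRECONDITION & SPEC =====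
def Spec_get_portKindNumber (sport : List Int) (dport : List Int) (out : Int) : Prop := out = get_portKindNumber_alt sport dport
instance (sport : List Int) (dport : List Int) (out : Int) : Decidable (Spec_get_portKindNumber sport dport out) := by unfold Spec_get_portKindNumber; infer_instance

-- ===== CLAIM (what is proved, stated in full; the proofs are below) =====
def Claim_equal_get_portKindNumber : Prop := ∀ (sport : List Int) (dport : List Int), Dom_get_portKindNumber sport dport → Spec_get_portKindNumber sport dport (get_portKindNumber sport dport)

-- ===== LEMMAS AND PROOFS =====

-- A-side invariant: the kinds loop keeps the list duplicate-free and collects exactly the elements seen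
theorem pvKindsLoop_invariant (ps : List Int) : ∀ (acc : List Int), acc.Nodup →
    (pvKindsLoop acc ps).Nodup ∧ (pvKindsLoop acc ps).toFinset = acc.toFinset ∪ ps.toFinset := by
  induction ps with
  | nil => intro acc h; simpa [pvKindsLoop] using h
  | cons p ps ih =>
    intro acc h
    have step : pvKindsLoop acc (p :: ps)
        = pvKindsLoop (if p ∈ acc then acc else acc ++ [p]) ps := rfl
    rw [step]
    by_cases hp : p ∈ acc
    · rw [if_pos hp]
      obtain ⟨h1, h2⟩ := ih acc h
      refine ⟨h1, ?_⟩
      rw [h2]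
      ext z
      simp only [Finset.mem_union, List.mem_toFinset, List.mem_cons]
      constructor
      · rintro (hz | hz) <;> tauto
      · rintro (hz | rfl | hz) <;> tauto
    · rw [if_neg hp]
      have hnd : (acc ++ [p]).Nodup := by
        rw [List.nodup_append]
        refine ⟨h, List.nodup_singleton p, ?_⟩
        intro a ha b hb
        rw [List.mem_singleton] at hb
        subst hb
        exact fun he => hp (he ▸ ha)
      obtain ⟨h1, h2⟩ := ih (acc ++ [p]) hnd
      refine ⟨h1, ?_⟩
      rw [h2]
      ext z
      simp only [Finset.mem_union, List.mem_toFinset, List.mem_append, List.mem_cons]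
      tauto

-- B-side invariant: on a sorted suffix, the scan adds (number of distinct values) - 1
theorem pvScan_card (ys : List Int) : ∀ (prev c : Int), (prev :: ys).Pairwise (· ≤ ·) →
    pvScan prev c ys = c + ((insert prev ys.toFinset).card : Int) - 1 := by
  induction ys with
  | nil => intro prev c _; simp [pvScan]
  | cons y ys ih =>
    intro prev c hp
    have hprev : ∀ z ∈ y :: ys, prev ≤ z := by
      intro z hz; exact (List.pairwise_cons.mp hp).1 z hz
    have htail : (y :: ys).Pairwise (· ≤ ·) := (List.pairwise_cons.mp hp).2
    simp only [pvScan]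
    rw [ih y _ htail]
    by_cases hne : y = prev
    · subst hne
      simp
    · have hlt : prev < y := lt_of_le_of_ne (hprev y (by simp)) (Ne.symm hne)
      have hnotin : prev ∉ insert y ys.toFinset := by
        simp only [Finset.mem_insert, List.mem_toFinset]
        rintro (rfl | hz)
        · exact hne rfl
        · have hy : y ≤ prev := (List.pairwise_cons.mp htail).1 prev hz
          exact absurd (lt_of_lt_of_le hlt hy) (lt_irrefl prev)
      rw [if_pos hne, List.toFinset_cons, Finset.card_insert_of_notMem hnotin]
      push_cast
      ring

-- A's result is the number of distinct values in sport ++ dport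
theorem get_portKindNumber_eq_card (sport dport : List Int) :
    get_portKindNumber sport dport = (((sport ++ dport).toFinset.card : Nat) : Int) := by
  obtain ⟨h1n, h1f⟩ := pvKindsLoop_invariant sport [] List.nodup_nil
  obtain ⟨h2n, h2f⟩ := pvKindsLoop_invariant dport (pvKindsLoop [] sport) h1n
  have hcard : (pvKindsLoop (pvKindsLoop [] sport) dport).toFinset.card
      = (pvKindsLoop (pvKindsLoop [] sport) dport).length := List.toFinset_card_of_nodup h2n
  simp only [get_portKindNumber]
  rw [← hcard, h2f, h1f]
  simp [List.toFinset_append]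

-- ===== VERDICT (by name: the statement is the Claim_ definition above) =====
theorem get_portKindNumber_spec : Claim_equal_get_portKindNumber := by
  intro sport dport _
  show get_portKindNumber sport dport = get_portKindNumber_alt sport dport
  rw [get_portKindNumber_eq_card]
  unfold get_portKindNumber_alt
  cases h : PySem.List.sorted (sport ++ dport) (fun x => x) false with
  | nil =>
    have : sport ++ dport = [] := (PySem.List.sorted_eq_nil_iff _ _ _).mp h
    simp [this]
  | cons x rest =>
    show ((sport ++ dport).toFinset.card : Int) = pvScan x 1 rest
    have hperm : (x :: rest).Perm (sport ++ dport) := h ▸ PySem.List.sorted_perm _ _ _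
    have hpw : (x :: rest).Pairwise (· ≤ ·) := by
      have := PySem.List.sorted_pairwise (sport ++ dport) (fun x => x)
      rw [h] at this
      simpa using this
    rw [← List.toFinset_eq_of_perm _ _ hperm]
    rw [pvScan_card rest x 1 hpw, List.toFinset_cons]
    ring
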